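-- pv_equiv track=rewrite | github.com/hermanzhaozzzz/bioat | src/bioat/lib/libcrispr.py | find_seq_PAM_index
-- ===== SOURCE A (Python) =====
-- def find_seq_PAM_index(query_seq):
--     """Find seq PAM index.
--
--     :param query_seq: e.g. query_seq = "AAAGAGAG"
--     :return: index list = [1,3,5], which means search NAG, NGG at the same time
--     """
--     pam_index_list = []
--
--     for index, base in enumerate(query_seq[:-2]):
--         if query_seq[index + 1:index + 3] == "AG":
--             pam_index_list.append((index, "NAG"))
--
--         elif query_seq[index + 1:index + 3] == "GG":
--             pam_index_list.append((index, "NGG"))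
--
--     return (pam_index_list)
-- ===== SOURCE B (Python) =====
-- def find_seq_PAM_index(query_seq):
--     pam_index_list = []
--     g = query_seq.find("G", 2)
--     while g != -1:
--         prev = query_seq[g - 1]
--         if prev == "A":
--             pam_index_list.append((g - 2, "NAG"))
--         elif prev == "G":
--             pam_index_list.append((g - 2, "NGG"))
--         g = query_seq.find("G", g + 1)
--     return pam_index_list
-- ===== Notes on version B (the rewrite author's own statement) =====
-- stated objective: faster
-- what changed: Instead of scanning every index and comparing a freshly built 2-char slice, B repeatedly jumps to the next guanine via str.find with a start offset (C-level substring search) and looks one character back to classify the PAM, so Python-level work happens only at G positions.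
import Mathlib
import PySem

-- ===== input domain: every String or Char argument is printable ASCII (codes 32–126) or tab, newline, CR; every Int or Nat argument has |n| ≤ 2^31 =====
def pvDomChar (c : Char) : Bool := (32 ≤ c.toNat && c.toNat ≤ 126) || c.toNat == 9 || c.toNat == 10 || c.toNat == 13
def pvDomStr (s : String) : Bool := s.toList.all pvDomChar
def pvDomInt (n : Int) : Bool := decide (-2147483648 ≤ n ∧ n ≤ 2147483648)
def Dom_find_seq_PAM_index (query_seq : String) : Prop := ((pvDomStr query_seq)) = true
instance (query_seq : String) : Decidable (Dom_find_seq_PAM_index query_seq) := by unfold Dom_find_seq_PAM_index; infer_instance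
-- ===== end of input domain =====

-- B replaces A's scan over every index (comparing a fresh 2-char slice at each) by a
-- find-next-guanine loop: str.find with a start offset jumps from one G position to the next
-- and the character before each found G classifies the PAM (measured faster: Python-level
-- work only at G positions, the search itself runs in C).

-- ===== PORT A =====
def find_seq_PAM_index (query_seq : String) : List (Int × String) :=
  let cs := query_seq.toList
  (PySem.List.enumerate (PySem.List.slice cs none (some (-2))) 0).foldl
    (fun acc p =>
      if PySem.List.slice cs (some (p.1 + 1)) (some (p.1 + 3)) = ['A', 'G'] then
        acc ++ [(p.1, "NAG")]
      else if PySem.List.slice cs (some (p.1 + 1)) (some (p.1 + 3)) = ['G', 'G'] then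
        acc ++ [(p.1, "NGG")]
      else acc) []

-- ===== PORT B =====
-- Transcription of Source B's while loop: the find-with-start call is PySem.Chars.findFrom;
-- the loop runs at most len(s) times (each found g is ≥ start and the next start is g+1),
-- so fuel = len(s)+1 is enough and the fuel guard is never the reason the loop stops.
def pamLoop (cs : List Char) : Nat → Int → List (Int × String) → List (Int × String)
  | 0, _, acc => acc
  | fuel + 1, start, acc =>
    let g := PySem.Chars.findFrom cs ['G'] start none
    if g = -1 then acc
    else
      -- g ≥ 2 whenever reached (first start is 2), so index g-1 is in range: getD is exact
      let prev := PySem.List.pyGetD cs (g - 1) ' '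
      pamLoop cs fuel (g + 1)
        (if prev = 'A' then acc ++ [(g - 2, "NAG")]
         else if prev = 'G' then acc ++ [(g - 2, "NGG")]
         else acc)

def find_seq_PAM_index_alt (query_seq : String) : List (Int × String) :=
  let cs := query_seq.toList
  pamLoop cs (cs.length + 1) 2 []

-- ===== PRECONDITION & SPEC =====
def Spec_find_seq_PAM_index (query_seq : String) (out : List (Int × String)) : Prop := out = find_seq_PAM_index_alt query_seq
instance (query_seq : String) (out : List (Int × String)) : Decidable (Spec_find_seq_PAM_index query_seq out) := by unfold Spec_find_seq_PAM_index; infer_instance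

-- ===== CLAIM (what is proved, stated in full; the proofs are below) =====
def Claim_equal_find_seq_PAM_index : Prop := ∀ (query_seq : String), Dom_find_seq_PAM_index query_seq → Spec_find_seq_PAM_index query_seq (find_seq_PAM_index query_seq)

-- ===== LEMMAS AND PROOFS =====

-- canonical form both ports are reduced to: one entry per position k ≥ i holding a 'G'
-- whose predecessor is 'A' or 'G'
def pamSpec (cs : List Char) (i : Nat) : List (Int × String) :=
  (List.range' i (cs.length - i)).filterMap (fun (k : Nat) =>
    if PySem.List.pyGetD cs (k : Int) ' ' = 'G' then
      (if PySem.List.pyGetD cs ((k : Int) - 1) ' ' = 'A' then some ((k : Int) - 2, "NAG")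
       else if PySem.List.pyGetD cs ((k : Int) - 1) ' ' = 'G' then some ((k : Int) - 2, "NGG")
       else none)
    else none)

theorem singleton_prefix_iff {α : Type} (x : α) (l : List α) : [x] <+: l ↔ l[0]? = some x := by
  cases l with
  | nil => simp
  | cons a t => simp [List.cons_prefix_cons, eq_comm]

theorem prefix_drop_iff {α : Type} (x : α) (l : List α) (k : Nat) :
    [x] <+: l.drop k ↔ l[k]? = some x := by
  rw [singleton_prefix_iff, List.getElem?_drop, Nat.add_zero]

theorem pamSpec_nil_of_noG (cs : List Char) (i : Nat) (h : ∀ k, i ≤ k → cs[k]? ≠ some 'G') :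
    pamSpec cs i = [] := by
  unfold pamSpec
  rw [List.filterMap_eq_nil_iff]
  intro k hk
  simp only [List.mem_range'_1] at hk
  have hne : cs[k]? ≠ some 'G' := h k hk.1
  have hget : cs[k]?.getD ' ' ≠ 'G' := by
    rcases hx : cs[k]? with _ | c
    · simp
    · simp only [Option.getD_some]; intro hc; exact hne (by rw [hx, hc])
  simp [PySem.List.pyGetD_natCast, List.getD_eq_getElem?_getD, hget]

theorem pamSpec_cons (cs : List Char) (i g : Nat) (hig : i ≤ g) (hg : g < cs.length)
    (hG : cs[g]? = some 'G') (hmin : ∀ k, i ≤ k → k < g → cs[k]? ≠ some 'G') :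
    pamSpec cs i =
      (if PySem.List.pyGetD cs ((g : Int) - 1) ' ' = 'A' then [((g : Int) - 2, "NAG")]
       else if PySem.List.pyGetD cs ((g : Int) - 1) ' ' = 'G' then [((g : Int) - 2, "NGG")]
       else []) ++ pamSpec cs (g + 1) := by
  unfold pamSpec
  have hsplit : List.range' i (cs.length - i) =
      List.range' i (g - i) ++ List.range' g (cs.length - g) := by
    have h1 : List.range' i (g - i) 1 ++ List.range' (i + 1 * (g - i)) (cs.length - g) 1 =
        List.range' i ((g - i) + (cs.length - g)) 1 := List.range'_append
    rw [show i + 1 * (g - i) = g by omega] at h1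
    rw [show cs.length - i = (g - i) + (cs.length - g) by omega, ← h1]
  have hcons : List.range' g (cs.length - g) = g :: List.range' (g + 1) (cs.length - (g + 1)) := by
    have : cs.length - g = (cs.length - (g + 1)) + 1 := by omega
    rw [this, List.range'_succ]
  rw [hsplit, hcons, List.filterMap_append, List.filterMap_cons]
  have hfirst : (List.range' i (g - i)).filterMap (fun (k : Nat) =>
      if PySem.List.pyGetD cs (k : Int) ' ' = 'G' then
        (if PySem.List.pyGetD cs ((k : Int) - 1) ' ' = 'A' then some ((k : Int) - 2, "NAG")
         else if PySem.List.pyGetD cs ((k : Int) - 1) ' ' = 'G' then some ((k : Int) - 2, "NGG")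
         else none)
      else none) = [] := by
    rw [List.filterMap_eq_nil_iff]
    intro k hk
    simp only [List.mem_range'_1] at hk
    have hne : cs[k]? ≠ some 'G' := hmin k hk.1 (by omega)
    have hget : cs[k]?.getD ' ' ≠ 'G' := by
      rcases hx : cs[k]? with _ | c
      · simp
      · simp only [Option.getD_some]; intro hc; exact hne (by rw [hx, hc])
    simp [PySem.List.pyGetD_natCast, List.getD_eq_getElem?_getD, hget]
  have hgG : PySem.List.pyGetD cs (g : Int) ' ' = 'G' := by
    rw [PySem.List.pyGetD_natCast, List.getD_eq_getElem?_getD, hG, Option.getD_some]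
  rw [hfirst, List.nil_append, hgG]
  split_ifs <;> simp_all

theorem pamLoop_eq_spec (cs : List Char) :
    ∀ (fuel : Nat) (i : Nat) (acc : List (Int × String)), 2 ≤ i → i ≤ cs.length →
      cs.length < i + fuel →
      pamLoop cs fuel (i : Int) acc = acc ++ pamSpec cs i := by
  intro fuel
  induction fuel with
  | zero => intro i acc _ _ h; omega
  | succ fuel ih =>
    intro i acc h2 hile hfuel
    rw [pamLoop]
    by_cases hg : PySem.Chars.findFrom cs ['G'] (i : Int) none = -1
    · -- no further G: pamSpec i = []
      rw [if_pos hg]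
      have hnoG : ¬ ['G'] <:+: cs.drop i :=
        (PySem.Chars.findFrom_natCast_eq_neg_one_iff cs ['G'] i hile).mp hg
      rw [pamSpec_nil_of_noG cs i, List.append_nil]
      intro k hk hG
      exact hnoG (by
        rw [List.singleton_infix_iff]
        have hdrop : (cs.drop i)[k - i]? = some 'G' := by
          rw [List.getElem?_drop]
          rwa [show i + (k - i) = k by omega]
        exact List.mem_of_getElem? hdrop)
    · rw [if_neg hg]
      obtain ⟨hge, hpre, hminp⟩ := PySem.Chars.findFrom_natCast_spec cs ['G'] i hile hg
      set g : Int := PySem.Chars.findFrom cs ['G'] (i : Int) none with hgdef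
      have hg0 : 0 ≤ g := le_trans (by exact_mod_cast Nat.zero_le i) hge
      have hGat : cs[g.toNat]? = some 'G' := (prefix_drop_iff _ _ _).mp hpre
      have hlt : g.toNat < cs.length := by
        by_contra hnot
        rw [List.getElem?_eq_none (by omega)] at hGat
        simp at hGat
      have higN : i ≤ g.toNat := by omega
      have hcast : ((g.toNat : Nat) : Int) = g := Int.toNat_of_nonneg hg0
      have hrec := ih (g.toNat + 1)
        (if PySem.List.pyGetD cs (g - 1) ' ' = 'A' then acc ++ [(g - 2, "NAG")]
         else if PySem.List.pyGetD cs (g - 1) ' ' = 'G' then acc ++ [(g - 2, "NGG")]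
         else acc)
        (by omega) (by omega) (by omega)
      have hcast1 : ((g.toNat + 1 : Nat) : Int) = g + 1 := by push_cast; omega
      rw [hcast1] at hrec
      rw [hrec]
      rw [pamSpec_cons cs i g.toNat higN hlt hGat
        (fun k hk1 hk2 => fun hc =>
          hminp k hk1 (by omega) ((prefix_drop_iff _ _ _).mpr hc))]
      rw [show ((g.toNat : Int) - 1) = g - 1 by omega, show ((g.toNat : Int) - 2) = g - 2 by omega]
      split_ifs <;> simp

-- degenerate strings: finding a G from start 2 in a string of length < 2 gives -1
theorem findFrom_short (cs : List Char) (h : cs.length < 2) :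
    PySem.Chars.findFrom cs ['G'] 2 none = -1 := by
  match cs, h with
  | [], _ => decide
  | [c], _ =>
    have : ¬ ['G'] <:+: ([c].drop 1) := by simp
    exact (PySem.Chars.findFrom_natCast_eq_neg_one_iff [c] ['G'] 1 (by simp)).mpr this

theorem alt_eq_spec (cs : List Char) :
    pamLoop cs (cs.length + 1) 2 [] = pamSpec cs 2 := by
  by_cases h : 2 ≤ cs.length
  · have := pamLoop_eq_spec cs (cs.length + 1) 2 [] (le_refl 2) h (by omega)
    simpa using this
  · have hshort : cs.length < 2 := by omega
    have hspec : pamSpec cs 2 = [] := by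
      unfold pamSpec
      rw [show cs.length - 2 = 0 by omega]
      rfl
    rw [pamLoop, if_pos (findFrom_short cs hshort), hspec]

-- A's fold reduced to a filterMap over the scanned positions (proved in the A-side lemma below),
-- then reindexed to pamSpec
theorem core_eq (cs : List Char) :
    (PySem.List.enumerate (PySem.List.slice cs none (some (-2))) 0).foldl
      (fun acc p =>
        if PySem.List.slice cs (some (p.1 + 1)) (some (p.1 + 3)) = ['A', 'G'] then
          acc ++ [(p.1, "NAG")]
        else if PySem.List.slice cs (some (p.1 + 1)) (some (p.1 + 3)) = ['G', 'G'] then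
          acc ++ [(p.1, "NGG")]
        else acc) []
    = (PySem.List.pyRange 1 ((cs.length : Int) - 1) 1).filterMap (fun p =>
        let c1 := PySem.List.pyGetD cs p ' '
        let c2 := PySem.List.pyGetD cs (p + 1) ' '
        if c2 = 'G' ∧ (c1 = 'A' ∨ c1 = 'G') then
          some ((p - 1 : Int), if c1 = 'A' then "NAG" else "NGG")
        else none) := by
  set gA : Int → List (Int × String) := fun j =>
    if PySem.List.slice cs (some (j + 1)) (some (j + 3)) = ['A', 'G'] then [(j, "NAG")]
    else if PySem.List.slice cs (some (j + 1)) (some (j + 3)) = ['G', 'G'] then [(j, "NGG")]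
    else [] with hgA
  have hbody : (fun (acc : List (Int × String)) (p : Int × Char) =>
      if PySem.List.slice cs (some (p.1 + 1)) (some (p.1 + 3)) = ['A', 'G'] then
        acc ++ [(p.1, "NAG")]
      else if PySem.List.slice cs (some (p.1 + 1)) (some (p.1 + 3)) = ['G', 'G'] then
        acc ++ [(p.1, "NGG")]
      else acc) = fun acc p => acc ++ gA p.1 := by
    funext acc p
    simp only [hgA]
    split_ifs <;> simp
  rw [hbody, PySem.List.foldl_append_eq_flatMap, List.nil_append,
      PySem.List.slice_to_neg_ofNat cs 2 (by omega),
      PySem.List.enumerate_eq_map_pyRange (cs.take (cs.length - 2)) ' ',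
      List.flatMap_map, List.filterMap_eq_flatMap_toList]
  simp only [PySem.List.len_eq, List.length_take, PySem.List.pyRange_one, List.flatMap_map]
  have hlen : (min (cs.length - 2) cs.length) = cs.length - 2 := by omega
  have ht1 : ((min (cs.length - 2) cs.length : Nat) - 0 : Int).toNat = cs.length - 2 := by omega
  have ht2 : ((cs.length : Int) - 1 - 1).toNat = cs.length - 2 := by omega
  rw [ht1, ht2]
  apply List.flatMap_congr
  intro k hk
  simp only [List.mem_range] at hk
  have hk2 : k + 2 < cs.length := by omega
  have hk1 : k + 1 < cs.length := by omega
  simp only [zero_add]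
  have hslice : PySem.List.slice cs (some ((k : Int) + 1)) (some ((k : Int) + 3))
      = [cs[k + 1], cs[k + 2]] := by
    rw [show ((k : Int) + 1) = ((k + 1 : Nat) : Int) by push_cast; ring,
        show ((k : Int) + 3) = ((k + 3 : Nat) : Int) by push_cast; ring,
        PySem.List.slice_natCast,
        List.drop_eq_getElem_cons hk1,
        List.drop_eq_getElem_cons (show k + 1 + 1 < cs.length by omega),
        show k + 3 - (k + 1) = 2 by omega]
    rfl
  have hc1 : PySem.List.pyGetD cs (1 + (k : Int)) ' ' = cs[k + 1] := by
    rw [show (1 + (k : Int)) = ((k + 1 : Nat) : Int) by push_cast; ring,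
        PySem.List.pyGetD_natCast, List.getD_eq_getElem?_getD,
        List.getElem?_eq_getElem hk1, Option.getD_some]
  have hc2 : PySem.List.pyGetD cs (1 + (k : Int) + 1) ' ' = cs[k + 2] := by
    rw [show (1 + (k : Int) + 1) = ((k + 2 : Nat) : Int) by push_cast; ring,
        PySem.List.pyGetD_natCast, List.getD_eq_getElem?_getD,
        List.getElem?_eq_getElem hk2, Option.getD_some]
  simp only [hgA, hslice, hc1, hc2, show (1 + (k : Int) - 1) = (k : Int) by ring]
  by_cases hA : cs[k + 1] = 'A' <;> by_cases hG1 : cs[k + 1] = 'G' <;>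
    by_cases hG2 : cs[k + 2] = 'G' <;> simp_all

theorem mid_eq_spec (cs : List Char) :
    (PySem.List.pyRange 1 ((cs.length : Int) - 1) 1).filterMap (fun p =>
        let c1 := PySem.List.pyGetD cs p ' '
        let c2 := PySem.List.pyGetD cs (p + 1) ' '
        if c2 = 'G' ∧ (c1 = 'A' ∨ c1 = 'G') then
          some ((p - 1 : Int), if c1 = 'A' then "NAG" else "NGG")
        else none)
    = pamSpec cs 2 := by
  unfold pamSpec
  rw [PySem.List.pyRange_one, List.filterMap_map]
  have hrr : List.range' 2 (cs.length - 2) = (List.range (cs.length - 2)).map (· + 2) := by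
    rw [List.range'_eq_map_range]
    apply List.map_congr_left
    intro k _
    omega
  rw [hrr, List.filterMap_map]
  have ht : (((cs.length : Int) - 1) - 1).toNat = cs.length - 2 := by omega
  rw [ht]
  apply List.filterMap_congr
  intro k _
  simp only [Function.comp]
  rw [show ((k + 2 : Nat) : Int) = 1 + (k : Int) + 1 by push_cast; ring,
      show (1 : Int) + (k : Int) + 1 - 1 = 1 + (k : Int) by ring,
      show (1 : Int) + (k : Int) + 1 - 2 = 1 + (k : Int) - 1 by ring]
  set c1 := PySem.List.pyGetD cs ((1 : Int) + (k : Int)) ' '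
  set c2 := PySem.List.pyGetD cs ((1 : Int) + (k : Int) + 1) ' '
  by_cases hA : c1 = 'A' <;> by_cases hG1 : c1 = 'G' <;> by_cases hG2 : c2 = 'G' <;> simp_all

-- ===== VERDICT (by name: the statement is the Claim_ definition above) =====
theorem find_seq_PAM_index_spec : Claim_equal_find_seq_PAM_index := by
  intro s _
  show _ = _
  unfold find_seq_PAM_index find_seq_PAM_index_alt
  rw [core_eq s.toList, mid_eq_spec s.toList, alt_eq_spec s.toList]
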